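-- pv_equiv track=rewrite | github.com/IndiMops/Amazinum-camp-tests | task1.py | deepest_lake_depth
-- ===== SOURCE A (Python) =====
-- def deepest_lake_depth(values):
--     n = len(values)
--     max_depth = 0
--     best_pair = None  # store the indices of the left and right boundaries of the lake
--     # Iterate through all pairs of indices with at least one element between them
--     for i in range(n - 1):
--         for j in range(i + 2, n):
--             # Check if all values between i and j are smaller than both end values
--             if all(values[k] < values[i] for k in range(i + 1, j)) and all(values[k] < values[j] for k in range(i + 1, j)):
--                 water_level = min(values[i], values[j])  # water level is the minimum of the two ends
--                 lake_bottom = min(values[k] for k in range(i + 1, j))  # lowest point of the lake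
--                 depth = water_level - lake_bottom
--                 if depth > max_depth:
--                     max_depth = depth
--                     best_pair = (i, j)
--     return max_depth, best_pair
-- ===== SOURCE B (Python) =====
-- def deepest_lake_depth(values):
--     # One pass per left boundary, maintaining the interior running max/min
--     # instead of re-scanning the interior for every pair: O(n^2) vs O(n^3).
--     n = len(values)
--     max_depth = 0
--     best_pair = None
--     for i in range(n - 2):
--         hi = values[i + 1]  # max of interior values[i+1 .. j-1]
--         lo = values[i + 1]  # min of the same interior
--         for j in range(i + 2, n):
--             if hi < values[i] and hi < values[j]:
--                 depth = min(values[i], values[j]) - lo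
--                 if depth > max_depth:
--                     max_depth = depth
--                     best_pair = (i, j)
--             v = values[j]
--             if v > hi:
--                 hi = v
--             if v < lo:
--                 lo = v
--     return max_depth, best_pair
-- ===== Notes on version B (the rewrite author's own statement) =====
-- stated objective: faster
-- what changed: B keeps a running maximum and minimum of the interior values while extending the right boundary, so the per-pair interior re-scans (two all() scans and a min() scan) of A disappear, turning O(n^3) into O(n^2).
import Mathlib
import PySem

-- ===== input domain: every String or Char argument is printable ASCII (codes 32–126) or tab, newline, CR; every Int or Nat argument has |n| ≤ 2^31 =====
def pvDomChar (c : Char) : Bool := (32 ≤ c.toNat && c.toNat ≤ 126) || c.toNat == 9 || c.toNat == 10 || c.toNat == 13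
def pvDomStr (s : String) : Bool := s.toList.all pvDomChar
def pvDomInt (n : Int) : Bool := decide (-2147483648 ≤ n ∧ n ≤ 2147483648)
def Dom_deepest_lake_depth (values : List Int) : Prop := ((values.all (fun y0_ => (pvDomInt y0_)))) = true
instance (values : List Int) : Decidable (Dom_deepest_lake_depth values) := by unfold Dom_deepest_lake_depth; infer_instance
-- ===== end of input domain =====

-- B replaces A's per-pair interior re-scans by a running interior max/min kept across the inner loop: O(n^2) instead of O(n^3).

-- values[k] (all indices used by either program are in range; default 0 is never read)
def pvGet (values : List Int) (k : Int) : Int := PySem.List.pyGetD values k 0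

-- ===== PORT A =====
-- body of A's inner loop over j (state = (max_depth, best_pair))
def aStep (values : List Int) (i : Int) (st : Int × Option (Int × Int)) (j : Int) :
    Int × Option (Int × Int) :=
  if ((PySem.List.pyRange (i+1) j 1).all (fun k => pvGet values k < pvGet values i)
      && (PySem.List.pyRange (i+1) j 1).all (fun k => pvGet values k < pvGet values j)) then
    let water_level := min (pvGet values i) (pvGet values j)
    -- min over a nonempty generator (j ≥ i+2 whenever this branch is reached)
    let lake_bottom :=
      (PySem.List.min? ((PySem.List.pyRange (i+1) j 1).map (fun k => pvGet values k))
        (fun x => x)).getD 0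
    let depth := water_level - lake_bottom
    if depth > st.1 then (depth, some (i, j)) else st
  else st

def deepest_lake_depth (values : List Int) : Int × (Option (Int × Int)) :=
  (PySem.List.pyRange 0 ((values.length : Int) - 1) 1).foldl
    (fun st i => (PySem.List.pyRange (i+2) (values.length : Int) 1).foldl (aStep values i) st)
    (0, none)

-- ===== PORT B =====
-- body of B's inner loop over j (state = ((max_depth, best_pair), (hi, lo)))
def bStep (values : List Int) (i : Int)
    (acc : (Int × Option (Int × Int)) × Int × Int) (j : Int) :
    (Int × Option (Int × Int)) × Int × Int :=
  let st := acc.1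
  let hi := acc.2.1
  let lo := acc.2.2
  let st' := if hi < pvGet values i ∧ hi < pvGet values j then
      (let depth := min (pvGet values i) (pvGet values j) - lo
       if depth > st.1 then (depth, some (i, j)) else st)
    else st
  let v := pvGet values j
  (st', (if v > hi then v else hi, if v < lo then v else lo))

def deepest_lake_depth_alt (values : List Int) : Int × (Option (Int × Int)) :=
  (PySem.List.pyRange 0 ((values.length : Int) - 2) 1).foldl
    (fun st i =>
      ((PySem.List.pyRange (i+2) (values.length : Int) 1).foldl (bStep values i)
        (st, (pvGet values (i+1), pvGet values (i+1)))).1)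
    (0, none)

-- ===== PRECONDITION & SPEC =====
def Spec_deepest_lake_depth (values : List Int) (out : Int × (Option (Int × Int))) : Prop := out = deepest_lake_depth_alt values
instance (values : List Int) (out : Int × (Option (Int × Int))) : Decidable (Spec_deepest_lake_depth values out) := by unfold Spec_deepest_lake_depth; infer_instance

-- ===== CLAIM (what is proved, stated in full; the proofs are below) =====
def Claim_equal_deepest_lake_depth : Prop := ∀ (values : List Int), Dom_deepest_lake_depth values → Spec_deepest_lake_depth values (deepest_lake_depth values)

-- ===== LEMMAS AND PROOFS =====

lemma foldl_max_lt_iff (t : List Int) (a c : Int) :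
    t.foldl max a < c ↔ a < c ∧ ∀ y ∈ t, y < c := by
  constructor
  · intro h
    exact ⟨lt_of_le_of_lt (PySem.List.le_foldl_max t a).1 h,
           fun y hy => lt_of_le_of_lt ((PySem.List.le_foldl_max t a).2 y hy) h⟩
  · rintro ⟨h1, h2⟩
    rcases PySem.List.foldl_max_mem t a with h | h
    · rw [h]; exact h1
    · exact h2 _ h

-- one inner step of B computes one inner step of A, given the hi/lo invariant
lemma step_eq (values : List Int) (i j : Int) (hij : i + 1 < j)
    (st : Int × Option (Int × Int)) :
    bStep values i
      (st,
        (((PySem.List.pyRange (i+2) j 1).map (pvGet values)).foldl max (pvGet values (i+1)),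
         ((PySem.List.pyRange (i+2) j 1).map (pvGet values)).foldl min (pvGet values (i+1)))) j
    = (aStep values i st j,
        (((PySem.List.pyRange (i+2) (j+1) 1).map (pvGet values)).foldl max (pvGet values (i+1)),
         ((PySem.List.pyRange (i+2) (j+1) 1).map (pvGet values)).foldl min (pvGet values (i+1)))) := by
  have hcons : PySem.List.pyRange (i+1) j 1 = (i+1) :: PySem.List.pyRange (i+2) j 1 := by
    have := PySem.List.pyRange_one_cons (a := i+1) (b := j) hij
    simpa [add_assoc] using this
  have hsnoc : PySem.List.pyRange (i+2) (j+1) 1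
      = PySem.List.pyRange (i+2) j 1 ++ [j] :=
    PySem.List.pyRange_one_succ_right (by omega)
  set R := PySem.List.pyRange (i+2) j 1 with hR
  set g := pvGet values with hg
  set M := (R.map g).foldl max (g (i+1)) with hM
  set m := (R.map g).foldl min (g (i+1)) with hm
  -- A's boolean condition equals B's comparison against the running max
  have hcond : ∀ c : Int,
      ((PySem.List.pyRange (i+1) j 1).all (fun k => g k < c)) = decide (M < c) := by
    intro c
    rw [hcons, Bool.eq_iff_iff]
    simp only [List.all_cons, Bool.and_eq_true, decide_eq_true_eq, List.all_eq_true, hM]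
    rw [foldl_max_lt_iff]
    simp
  -- A's lake bottom equals B's running min
  have hbot :
      (PySem.List.min? ((PySem.List.pyRange (i+1) j 1).map (fun k => g k))
        (fun x => x)).getD 0 = m := by
    rw [hcons]
    simp only [List.map_cons]
    rw [PySem.List.min?_id_cons]
    rfl
  have hAnd : (decide (M < g i) && decide (M < g j)) = decide (M < g i ∧ M < g j) := by
    by_cases h1 : M < g i <;> by_cases h2 : M < g j <;> simp [h1, h2]
  unfold aStep bStep
  simp only [← hg, hcond, hbot, hsnoc, List.map_append, List.foldl_append,
    List.map_cons, List.map_nil, List.foldl_cons, List.foldl_nil, hAnd, ← hM, ← hm]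
  have hmax : (if g j > M then g j else M) = max M (g j) := by
    rw [max_def]; split_ifs <;> omega
  have hmin : (if g j < m then g j else m) = min m (g j) := by
    rw [min_def]; split_ifs <;> omega
  rw [hmax, hmin]
  by_cases h : M < g i ∧ M < g j
  · simp [h]
  · simp [h]

-- B's inner fold carries A's inner fold in its first component,
-- with hi/lo the running max/min of the interior values
lemma inner_fold (values : List Int) (i : Int) (d : Nat) (st : Int × Option (Int × Int)) :
    (PySem.List.pyRange (i+2) (i+2+d) 1).foldl (bStep values i)
        (st, (pvGet values (i+1), pvGet values (i+1)))
    = ((PySem.List.pyRange (i+2) (i+2+d) 1).foldl (aStep values i) st,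
       (((PySem.List.pyRange (i+2) (i+2+d) 1).map (pvGet values)).foldl max (pvGet values (i+1)),
        ((PySem.List.pyRange (i+2) (i+2+d) 1).map (pvGet values)).foldl min (pvGet values (i+1)))) := by
  induction d with
  | zero =>
      rw [show (i+2+(0:Nat) : Int) = i+2 by push_cast; ring]
      rw [PySem.List.pyRange_one_eq_nil (le_refl _)]
      simp
  | succ d ih =>
      have hsnoc : PySem.List.pyRange (i+2) (i+2+(d+1:Nat)) 1
          = PySem.List.pyRange (i+2) (i+2+d) 1 ++ [i+2+d] := by
        rw [show (i+2+(d+1:Nat) : Int) = (i+2+(d:Nat)) + 1 by push_cast; ring]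
        exact PySem.List.pyRange_one_succ_right (by omega)
      rw [hsnoc, List.foldl_append, List.foldl_append, List.foldl_cons, List.foldl_nil,
        List.foldl_cons, List.foldl_nil, ih]
      have := step_eq values i (i+2+(d:Nat)) (by omega)
        ((PySem.List.pyRange (i+2) (i+2+(d:Nat)) 1).foldl (aStep values i) st)
      rw [this]
      rw [show (i+2+(d:Nat)) + 1 = (i+2+(d+1:Nat) : Int) by push_cast; ring, hsnoc]

-- B's whole per-i body equals A's per-i body, for every i
lemma body_eq (values : List Int) (i : Int) (st : Int × Option (Int × Int)) :
    ((PySem.List.pyRange (i+2) (values.length : Int) 1).foldl (bStep values i)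
      (st, (pvGet values (i+1), pvGet values (i+1)))).1
    = (PySem.List.pyRange (i+2) (values.length : Int) 1).foldl (aStep values i) st := by
  by_cases h : i + 2 ≤ (values.length : Int)
  · obtain ⟨d, hd⟩ : ∃ d : Nat, (values.length : Int) = i + 2 + d :=
      ⟨((values.length : Int) - (i+2)).toNat, by omega⟩
    rw [hd, inner_fold]
  · rw [PySem.List.pyRange_one_eq_nil (by omega)]
    simp

-- ===== VERDICT (by name: the statement is the Claim_ definition above) =====
theorem deepest_lake_depth_spec : Claim_equal_deepest_lake_depth := by
  intro values _
  unfold Spec_deepest_lake_depth deepest_lake_depth deepest_lake_depth_alt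
  have hbody : ∀ (l : List Int) (s : Int × Option (Int × Int)),
      l.foldl (fun st i =>
        (PySem.List.pyRange (i+2) (values.length : Int) 1).foldl (aStep values i) st) s
      = l.foldl (fun st i =>
          ((PySem.List.pyRange (i+2) (values.length : Int) 1).foldl (bStep values i)
            (st, (pvGet values (i+1), pvGet values (i+1)))).1) s := by
    intro l
    induction l with
    | nil => intro s; rfl
    | cons a t ih =>
        intro s
        simp only [List.foldl_cons]
        rw [body_eq, ih]
  by_cases h2 : 2 ≤ (values.length : Int)
  · have hsplit : PySem.List.pyRange 0 ((values.length : Int) - 1) 1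
        = PySem.List.pyRange 0 ((values.length : Int) - 2) 1 ++ [(values.length : Int) - 2] := by
      rw [show ((values.length : Int) - 1) = ((values.length : Int) - 2) + 1 by ring]
      exact PySem.List.pyRange_one_succ_right (by omega)
    rw [hsplit, List.foldl_append]
    simp only [List.foldl_cons, List.foldl_nil]
    rw [show ((values.length : Int) - 2 + 2) = (values.length : Int) by ring,
      PySem.List.pyRange_one_eq_nil (le_refl _), List.foldl_nil]
    exact hbody _ _
  · rw [PySem.List.pyRange_one_eq_nil (show (values.length : Int) - 1 ≤ 0 by omega),
      PySem.List.pyRange_one_eq_nil (show (values.length : Int) - 2 ≤ 0 by omega)]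
    rfl
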